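-- pv_equiv track=rewrite | github.com/Emerald141/project-euler | Problems 401-500/p497_DrunkenTowerOfHanoi.py | solve
-- ===== SOURCE A (Python) =====
-- def solve(cap = 10 ** 4, mod = 10 ** 9):
--     m = 0
--     result = 0
--     for n in range(1, cap + 1):
--         m = m * 2 + ((n % 2) == 0)
--         a = pow(3, n, mod)
--         b = pow(6, n, mod)
--         c = pow(9, n, mod)
--         k = pow(10, n, mod)
--         t = [b - a, c - a, b - a, c - b, c - a, c - b]
--         d = [b - 1, c - 1, k - a, c - 1, k - a, k - b]
--         mult = [m, m, m + 1, m, m, m]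
--         if n % 2 == 1:
--             mult[1] += 1
--         else:
--             mult[4] -= 1
--         for i in range(6):
--             result += mult[i] * (2 * t[i] * d[i] - t[i] ** 2)
--         result %= mod
--     return result
-- ===== SOURCE B (Python) =====
-- # B evaluates the symbolically expanded form of A's six quadratic terms:
-- # sum_i mult_i*(2*t_i*d_i - t_i^2) collapses (since 3^n*3^n = 9^n etc.) to
-- #   m * (4*3^n - 4*9^n - 4*30^n + 4*90^n) + parity-dependent correction,
-- # so B just maintains one running modular power per base in the table and
-- # never forms t/d/mult lists or calls pow().
--
-- _BASES = [3, 9, 30, 36, 60, 81, 90]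
-- _CM = [(0, 4), (1, -4), (2, -4), (6, 4)]                    # coefficient of m
-- _CODD = [(0, 2), (1, -2), (2, -2), (3, -1), (4, 2), (5, 1)]  # n odd
-- _CEVEN = [(3, -1), (4, 2), (5, 1), (6, -2)]                  # n even
--
-- def solve(cap = 10 ** 4, mod = 10 ** 9):
--     pw = [1] * 7
--     m = 0
--     res = 0
--     for n in range(1, cap + 1):
--         pw = [p * x % mod for p, x in zip(pw, _BASES)]
--         m = (2 * m + 1 - n % 2) % mod
--         lin = _CODD if n % 2 else _CEVEN
--         res = (res + m * sum(c * pw[i] for i, c in _CM)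
--                    + sum(c * pw[i] for i, c in lin)) % mod
--     return res
-- ===== Notes on version B (the rewrite author's own statement) =====
-- stated objective: faster
-- what changed: B symbolically expands A's six quadratic mult*(2*t*d-t^2) terms into fixed (base,coefficient) tables (the expansion collapses to 4 monomials times m plus a small parity correction) and evaluates them with one incrementally maintained running modular power per base, eliminating the pow() calls, the t/d/mult lists and the inner 6-term loop, while keeping m reduced mod `mod` instead of letting it grow to cap bits.
import Mathlib
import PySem

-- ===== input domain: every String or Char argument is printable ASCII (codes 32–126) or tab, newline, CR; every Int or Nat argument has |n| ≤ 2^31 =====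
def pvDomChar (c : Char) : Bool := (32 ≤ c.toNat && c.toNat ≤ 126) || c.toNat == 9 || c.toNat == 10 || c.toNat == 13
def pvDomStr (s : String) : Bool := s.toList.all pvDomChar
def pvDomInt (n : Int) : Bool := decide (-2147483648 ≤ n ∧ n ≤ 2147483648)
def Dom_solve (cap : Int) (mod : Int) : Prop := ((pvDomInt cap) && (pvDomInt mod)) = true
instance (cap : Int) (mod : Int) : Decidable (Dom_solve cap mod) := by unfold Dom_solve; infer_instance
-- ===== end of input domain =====

-- B evaluates the symbolic expansion of A's six quadratic terms as a fixed (base, coefficient)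
-- table with one running modular power per base (no pow(), no t/d/mult lists); the timing
-- run measured it faster.

-- ===== PORT A =====
-- one iteration of A's for-loop; state = (m, result)
def solveStepA (mod : Int) (st : Int × Int) (n : Int) : Int × Int :=
  let m := st.1 * 2 + (if PySem.Int.mod n 2 = 0 then (1 : Int) else 0)
  let a := PySem.Int.powMod 3 n.toNat mod
  let b := PySem.Int.powMod 6 n.toNat mod
  let c := PySem.Int.powMod 9 n.toNat mod
  let k := PySem.Int.powMod 10 n.toNat mod
  let t := [b - a, c - a, b - a, c - b, c - a, c - b]
  let d := [b - 1, c - 1, k - a, c - 1, k - a, k - b]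
  let mult := [m, m, m + 1, m, m, m]
  let mult := if PySem.Int.mod n 2 = 1
              then mult.set 1 (PySem.List.pyGetD mult 1 0 + 1)
              else mult.set 4 (PySem.List.pyGetD mult 4 0 - 1)
  let result := (PySem.List.pyRange 0 6 1).foldl
    (fun r i => r + PySem.List.pyGetD mult i 0 *
      (2 * PySem.List.pyGetD t i 0 * PySem.List.pyGetD d i 0 - (PySem.List.pyGetD t i 0) ^ 2)) st.2
  (m, PySem.Int.mod result mod)

def solve (cap : Int) (mod : Int) : Int :=
  ((PySem.List.pyRange 1 (cap + 1) 1).foldl (solveStepA mod) (0, 0)).2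

-- ===== PORT B =====
-- the hard-coded coefficient tables of Source B (indices address pvBases)
def pvBases : List Int := [3, 9, 30, 36, 60, 81, 90]
def pvCM : List (Int × Int) := [(0, 4), (1, -4), (2, -4), (6, 4)]
def pvCODD : List (Int × Int) := [(0, 2), (1, -2), (2, -2), (3, -1), (4, 2), (5, 1)]
def pvCEVEN : List (Int × Int) := [(3, -1), (4, 2), (5, 1), (6, -2)]

-- one iteration of B's for-loop; state = (pw, m, res)
def solveStepB (mod : Int) (st : List Int × Int × Int) (n : Int) : List Int × Int × Int :=
  let pw := (st.1.zip pvBases).map (fun px => PySem.Int.mod (px.1 * px.2) mod)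
  let m := PySem.Int.mod (2 * st.2.1 + 1 - PySem.Int.mod n 2) mod
  let lin := if PySem.Int.mod n 2 ≠ 0 then pvCODD else pvCEVEN
  let res := PySem.Int.mod
    (st.2.2 + m * (pvCM.map (fun ic => ic.2 * PySem.List.pyGetD pw ic.1 0)).sum
            + (lin.map (fun ic => ic.2 * PySem.List.pyGetD pw ic.1 0)).sum) mod
  (pw, m, res)

def solve_alt (cap : Int) (mod : Int) : Int :=
  ((PySem.List.pyRange 1 (cap + 1) 1).foldl (solveStepB mod)
    ([1, 1, 1, 1, 1, 1, 1], 0, 0)).2.2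

-- ===== PRECONDITION & SPEC =====
-- Pre_ excludes exactly the inputs where Python raises: with cap ≥ 1 and mod = 0 the first
-- pow(3, n, 0) raises ValueError (B's `% 0` raises ZeroDivisionError there too).
def Pre_solve (cap : Int) (mod : Int) : Prop := mod ≠ 0 ∨ cap < 1
instance (cap : Int) (mod : Int) : Decidable (Pre_solve cap mod) := by unfold Pre_solve; infer_instance
def pvWitness_solve : Int × Int := (4, 7)

def Spec_solve (cap : Int) (mod : Int) (out : Int) : Prop := out = solve_alt cap mod
instance (cap : Int) (mod : Int) (out : Int) : Decidable (Spec_solve cap mod out) := by unfold Spec_solve; infer_instance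

-- ===== CLAIM (what is proved, stated in full; the proofs are below) =====
def Claim_equal_solve : Prop := ∀ (cap : Int) (mod : Int), Dom_solve cap mod → Pre_solve cap mod → Spec_solve cap mod (solve cap mod)

-- ===== LEMMAS AND PROOFS =====

-- `mod` divides the difference between x and its Python remainder x % mod
lemma fmod_sub_self_dvd (x m : Int) : m ∣ (Int.fmod x m - x) := by
  rw [Int.fmod_def]; exact ⟨-(Int.fdiv x m), by ring⟩

-- congruent numbers have the same Python remainder
lemma fmod_congr {x y m : Int} (h : m ∣ (x - y)) : Int.fmod x m = Int.fmod y m := by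
  obtain ⟨k, hk⟩ := h
  have hxy : x = y + m * k := by linarith
  rw [hxy, Int.add_mul_fmod_self_left]

-- A's loop step, evaluated to closed form (lists, pow and the inner loop eliminated)
lemma stepA_eval (mod n : Int) (st : Int × Int) :
    solveStepA mod st n =
    (st.1 * 2 + (if PySem.Int.mod n 2 = 0 then (1 : Int) else 0),
     Int.fmod (st.2
       + (st.1 * 2 + (if PySem.Int.mod n 2 = 0 then (1 : Int) else 0)) *
         ((fun a b c k =>
            (2*(b-a)*(b-1) - (b-a)*(b-a)) + (2*(c-a)*(c-1) - (c-a)*(c-a)) + (2*(b-a)*(k-a) - (b-a)*(b-a))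
          + (2*(c-b)*(c-1) - (c-b)*(c-b)) + (2*(c-a)*(k-a) - (c-a)*(c-a)) + (2*(c-b)*(k-b) - (c-b)*(c-b)))
          (Int.fmod (3^n.toNat) mod) (Int.fmod (6^n.toNat) mod) (Int.fmod (9^n.toNat) mod) (Int.fmod (10^n.toNat) mod))
       + ((fun a b k => 2*(b-a)*(k-a) - (b-a)*(b-a))
          (Int.fmod (3^n.toNat) mod) (Int.fmod (6^n.toNat) mod) (Int.fmod (10^n.toNat) mod))
       + (if PySem.Int.mod n 2 = 1
          then (fun a c => 2*(c-a)*(c-1) - (c-a)*(c-a)) (Int.fmod (3^n.toNat) mod) (Int.fmod (9^n.toNat) mod)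
          else -((fun a c k => 2*(c-a)*(k-a) - (c-a)*(c-a))
                 (Int.fmod (3^n.toNat) mod) (Int.fmod (9^n.toNat) mod) (Int.fmod (10^n.toNat) mod)))) mod) := by
  rcases PySem.Int.mod_two_eq n with h | h
  all_goals {
    have e : PySem.List.pyRange 0 6 1 = [0, 1, 2, 3, 4, 5] := rfl
    simp only [solveStepA, e, List.foldl, h]
    norm_num [PySem.List.pyGetD, PySem.List.pyGet?, PySem.List.pyIdx?, PySem.Int.powMod,
      PySem.Int.mod, List.set, List.getElem_cons_succ, List.getElem_cons_zero,
      show Int.toNat 0 = 0 from rfl, show Int.toNat 1 = 1 from rfl, show Int.toNat 2 = 2 from rfl,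
      show Int.toNat 3 = 3 from rfl, show Int.toNat 4 = 4 from rfl, show Int.toNat 5 = 5 from rfl]
    ring_nf }

-- B's loop step on a length-7 power list, evaluated to closed form
lemma stepB_eval (mod n : Int) (p0 p1 p2 p3 p4 p5 p6 m r : Int) :
    solveStepB mod ([p0, p1, p2, p3, p4, p5, p6], m, r) n =
    ([Int.fmod (p0*3) mod, Int.fmod (p1*9) mod, Int.fmod (p2*30) mod, Int.fmod (p3*36) mod,
      Int.fmod (p4*60) mod, Int.fmod (p5*81) mod, Int.fmod (p6*90) mod],
     Int.fmod (2*m + 1 - PySem.Int.mod n 2) mod,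
     Int.fmod (r + Int.fmod (2*m + 1 - PySem.Int.mod n 2) mod *
         (4 * Int.fmod (p0*3) mod + -4 * Int.fmod (p1*9) mod + -4 * Int.fmod (p2*30) mod + 4 * Int.fmod (p6*90) mod)
       + (if PySem.Int.mod n 2 ≠ 0
          then 2 * Int.fmod (p0*3) mod + -2 * Int.fmod (p1*9) mod + -2 * Int.fmod (p2*30) mod
               + -1 * Int.fmod (p3*36) mod + 2 * Int.fmod (p4*60) mod + 1 * Int.fmod (p5*81) mod
          else -1 * Int.fmod (p3*36) mod + 2 * Int.fmod (p4*60) mod + 1 * Int.fmod (p5*81) mod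
               + -2 * Int.fmod (p6*90) mod)) mod) := by
  by_cases h : Int.fmod n 2 = 0
  all_goals
    simp only [solveStepB, pvBases, pvCM, pvCODD, pvCEVEN, List.zip, List.zipWith, List.map,
      List.sum_cons, List.sum_nil, PySem.Int.mod, h, ne_eq]
  all_goals
    norm_num [PySem.List.pyGetD, PySem.List.pyGet?, PySem.List.pyIdx?, h,
      show Int.toNat 0 = 0 from rfl, show Int.toNat 1 = 1 from rfl, show Int.toNat 2 = 2 from rfl,
      show Int.toNat 3 = 3 from rfl, show Int.toNat 4 = 4 from rfl, show Int.toNat 5 = 5 from rfl,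
      show Int.toNat 6 = 6 from rfl]
  all_goals ring_nf

-- transfer a divisibility goal on Int into ZMod M.natAbs
lemma dvd_iff_zmod (M x : Int) : M ∣ x ↔ ((x : ZMod M.natAbs) = 0) := by
  rw [ZMod.intCast_zmod_eq_zero_iff_dvd, Int.natAbs_dvd]

-- a divisibility fact, as an equality of casts in ZMod M.natAbs
lemma cast_eq_of_dvd (M x y : Int) (h : M ∣ (x - y)) :
    ((x : Int) : ZMod M.natAbs) = ((y : Int) : ZMod M.natAbs) := by
  have h0 : (((x - y : Int)) : ZMod M.natAbs) = 0 := (dvd_iff_zmod M (x - y)).mp h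
  push_cast at h0
  linear_combination h0

-- the polynomial identity behind B's tables: A's formula for one n is congruent to
-- B's table evaluation, given that every running quantity is congruent to its power
lemma cong_result (M mA mB a b c k q0 q1 q2 q3 q4 q5 q6 : Int) (n : Nat) (odd : Bool)
    (h3 : M ∣ (a - 3^n)) (h6 : M ∣ (b - 6^n)) (h9 : M ∣ (c - 9^n)) (h10 : M ∣ (k - 10^n))
    (hq0 : M ∣ (q0 - 3^n)) (hq1 : M ∣ (q1 - 9^n)) (hq2 : M ∣ (q2 - 30^n))
    (hq3 : M ∣ (q3 - 36^n)) (hq4 : M ∣ (q4 - 60^n)) (hq5 : M ∣ (q5 - 81^n))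
    (hq6 : M ∣ (q6 - 90^n)) (hm : M ∣ (mA - mB)) :
    M ∣ ((mA *
         ((2*(b-a)*(b-1) - (b-a)*(b-a)) + (2*(c-a)*(c-1) - (c-a)*(c-a)) + (2*(b-a)*(k-a) - (b-a)*(b-a))
          + (2*(c-b)*(c-1) - (c-b)*(c-b)) + (2*(c-a)*(k-a) - (c-a)*(c-a)) + (2*(c-b)*(k-b) - (c-b)*(c-b)))
       + (2*(b-a)*(k-a) - (b-a)*(b-a))
       + (if odd then (2*(c-a)*(c-1) - (c-a)*(c-a)) else -(2*(c-a)*(k-a) - (c-a)*(c-a))))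
      - (mB * (4*q0 + -4*q1 + -4*q2 + 4*q6)
       + (if odd then 2*q0 + -2*q1 + -2*q2 + -1*q3 + 2*q4 + 1*q5
          else -1*q3 + 2*q4 + 1*q5 + -2*q6))) := by
  rw [dvd_iff_zmod]
  have e3 := cast_eq_of_dvd M a (3^n) h3
  have e6 := cast_eq_of_dvd M b (6^n) h6
  have e9 := cast_eq_of_dvd M c (9^n) h9
  have e10 := cast_eq_of_dvd M k (10^n) h10
  have eq0 := cast_eq_of_dvd M q0 (3^n) hq0
  have eq1 := cast_eq_of_dvd M q1 (9^n) hq1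
  have eq2 := cast_eq_of_dvd M q2 (30^n) hq2
  have eq3 := cast_eq_of_dvd M q3 (36^n) hq3
  have eq4 := cast_eq_of_dvd M q4 (60^n) hq4
  have eq5 := cast_eq_of_dvd M q5 (81^n) hq5
  have eq6 := cast_eq_of_dvd M q6 (90^n) hq6
  have em := cast_eq_of_dvd M mA mB hm
  push_cast at e3 e6 e9 e10 eq0 eq1 eq2 eq3 eq4 eq5 eq6 em
  have h30 : ((30 : ZMod M.natAbs))^n = (3 : ZMod M.natAbs)^n * (10 : ZMod M.natAbs)^n := by
    rw [show ((30 : ZMod M.natAbs)) = 3 * 10 by norm_num, mul_pow]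
  have h36 : ((36 : ZMod M.natAbs))^n = (6 : ZMod M.natAbs)^n * (6 : ZMod M.natAbs)^n := by
    rw [show ((36 : ZMod M.natAbs)) = 6 * 6 by norm_num, mul_pow]
  have h60 : ((60 : ZMod M.natAbs))^n = (6 : ZMod M.natAbs)^n * (10 : ZMod M.natAbs)^n := by
    rw [show ((60 : ZMod M.natAbs)) = 6 * 10 by norm_num, mul_pow]
  have h81 : ((81 : ZMod M.natAbs))^n = (9 : ZMod M.natAbs)^n * (9 : ZMod M.natAbs)^n := by
    rw [show ((81 : ZMod M.natAbs)) = 9 * 9 by norm_num, mul_pow]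
  have h90 : ((90 : ZMod M.natAbs))^n = (9 : ZMod M.natAbs)^n * (10 : ZMod M.natAbs)^n := by
    rw [show ((90 : ZMod M.natAbs)) = 9 * 10 by norm_num, mul_pow]
  cases odd <;>
    · simp only [if_true, if_false, Bool.false_eq_true]
      push_cast
      rw [e3, e6, e9, e10, eq0, eq1, eq2, eq3, eq4, eq5, eq6, em, h30, h36, h60, h81, h90]
      ring

-- the loop invariant: after the first N iterations (i) B's power list holds values
-- congruent to 3^N, 9^N, 30^N, 36^N, 60^N, 81^N, 90^N, (ii) A's m and B's m are
-- congruent, (iii) the two results are EQUAL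
lemma loop_inv (mod : Int) (N : Nat) :
    ∃ p0 p1 p2 p3 p4 p5 p6 : Int,
    ((PySem.List.pyRange 1 ((N : Int) + 1) 1).foldl (solveStepB mod) ([1,1,1,1,1,1,1], 0, 0)).1
      = [p0, p1, p2, p3, p4, p5, p6] ∧
    mod ∣ (p0 - 3^N) ∧ mod ∣ (p1 - 9^N) ∧ mod ∣ (p2 - 30^N) ∧ mod ∣ (p3 - 36^N) ∧
    mod ∣ (p4 - 60^N) ∧ mod ∣ (p5 - 81^N) ∧ mod ∣ (p6 - 90^N) ∧
    mod ∣ (((PySem.List.pyRange 1 ((N : Int) + 1) 1).foldl (solveStepA mod) (0, 0)).1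
            - ((PySem.List.pyRange 1 ((N : Int) + 1) 1).foldl (solveStepB mod) ([1,1,1,1,1,1,1], 0, 0)).2.1) ∧
    ((PySem.List.pyRange 1 ((N : Int) + 1) 1).foldl (solveStepA mod) (0, 0)).2
      = ((PySem.List.pyRange 1 ((N : Int) + 1) 1).foldl (solveStepB mod) ([1,1,1,1,1,1,1], 0, 0)).2.2 := by
  induction N with
  | zero =>
    have e : PySem.List.pyRange 1 (((0 : Nat) : Int) + 1) 1 = [] := rfl
    rw [e]
    exact ⟨1, 1, 1, 1, 1, 1, 1, rfl, by simp⟩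
  | succ N ih =>
    obtain ⟨p0, p1, p2, p3, p4, p5, p6, hpw, h0, h1, h2, h3, h4, h5, h6, hm, hr⟩ := ih
    have hsplit : PySem.List.pyRange 1 (((N + 1 : Nat) : Int) + 1) 1
        = PySem.List.pyRange 1 ((N : Int) + 1) 1 ++ [(N : Int) + 1] := by
      have h1 : (((N + 1 : Nat) : Int) + 1) = ((N : Int) + 1) + 1 := by push_cast; ring
      rw [h1, PySem.List.pyRange_one_succ_right (by omega)]
    rw [hsplit, List.foldl_append, List.foldl_append]
    set SA := (PySem.List.pyRange 1 ((N : Int) + 1) 1).foldl (solveStepA mod) (0, 0) with hSA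
    set SB := (PySem.List.pyRange 1 ((N : Int) + 1) 1).foldl (solveStepB mod) ([1,1,1,1,1,1,1], 0, 0) with hSB
    have hSBfull : SB = ([p0, p1, p2, p3, p4, p5, p6], SB.2.1, SB.2.2) := by
      rw [← hpw]
    have hn : ((N : Int) + 1).toNat = N + 1 := by omega
    simp only [List.foldl_cons, List.foldl_nil]
    rw [hSBfull, stepB_eval, stepA_eval]
    -- congruences for the updated powers
    have step_pow : ∀ (p : Int) (x : Int) (y : Int), mod ∣ (p - y) →
        mod ∣ (Int.fmod (p * x) mod - y * x) := by
      intro p x y hd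
      obtain ⟨u, hu⟩ := hd
      obtain ⟨v, hv⟩ := fmod_sub_self_dvd (p * x) mod
      exact ⟨v + u * x, by linarith [congrArg (· * x) hu]⟩
    have g0 := step_pow p0 3 (3^N) h0
    have g1 := step_pow p1 9 (9^N) h1
    have g2 := step_pow p2 30 (30^N) h2
    have g3 := step_pow p3 36 (36^N) h3
    have g4 := step_pow p4 60 (60^N) h4
    have g5 := step_pow p5 81 (81^N) h5
    have g6 := step_pow p6 90 (90^N) h6
    rw [show (3:Int)^N * 3 = 3^(N+1) from (pow_succ 3 N).symm] at g0
    rw [show (9:Int)^N * 9 = 9^(N+1) from (pow_succ 9 N).symm] at g1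
    rw [show (30:Int)^N * 30 = 30^(N+1) from (pow_succ 30 N).symm] at g2
    rw [show (36:Int)^N * 36 = 36^(N+1) from (pow_succ 36 N).symm] at g3
    rw [show (60:Int)^N * 60 = 60^(N+1) from (pow_succ 60 N).symm] at g4
    rw [show (81:Int)^N * 81 = 81^(N+1) from (pow_succ 81 N).symm] at g5
    rw [show (90:Int)^N * 90 = 90^(N+1) from (pow_succ 90 N).symm] at g6
    -- congruence of the two updated m's
    have hmm : mod ∣ ((SA.1 * 2 + (if PySem.Int.mod ((N : Int) + 1) 2 = 0 then (1 : Int) else 0))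
        - Int.fmod (2 * SB.2.1 + 1 - PySem.Int.mod ((N : Int) + 1) 2) mod) := by
      obtain ⟨u, hu⟩ := hm
      obtain ⟨v, hv⟩ := fmod_sub_self_dvd
        (2 * SB.2.1 + 1 - PySem.Int.mod ((N : Int) + 1) 2) mod
      rcases PySem.Int.mod_two_eq ((N : Int) + 1) with h | h <;>
        · rw [h] at hv ⊢
          norm_num at hv ⊢
          exact ⟨2 * u - v, by linarith⟩
    refine ⟨_, _, _, _, _, _, _, rfl, g0, g1, g2, g3, g4, g5, g6, hmm, ?_⟩
    -- the two updated results are equal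
    rw [hr]
    apply fmod_congr
    rcases PySem.Int.mod_two_eq ((N : Int) + 1) with h | h
    · -- even: A's branch `mod = 0`, B's branch `¬ (mod ≠ 0)`
      simp only [h]
      norm_num [hn]
      have := cong_result mod
        (SA.1 * 2 + 1) (Int.fmod (2 * SB.2.1 + 1 - 0) mod)
        (Int.fmod (3^(N+1)) mod) (Int.fmod (6^(N+1)) mod) (Int.fmod (9^(N+1)) mod) (Int.fmod (10^(N+1)) mod)
        (Int.fmod (p0*3) mod) (Int.fmod (p1*9) mod) (Int.fmod (p2*30) mod) (Int.fmod (p3*36) mod)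
        (Int.fmod (p4*60) mod) (Int.fmod (p5*81) mod) (Int.fmod (p6*90) mod)
        (N+1) false
        (fmod_sub_self_dvd _ _) (fmod_sub_self_dvd _ _) (fmod_sub_self_dvd _ _) (fmod_sub_self_dvd _ _)
        g0 g1 g2 g3 g4 g5 g6
        (by rw [h] at hmm; norm_num at hmm ⊢; exact hmm)
      simp only [if_false, Bool.false_eq_true] at this
      obtain ⟨w, hw⟩ := this
      norm_num at hw
      exact ⟨w, by linarith⟩
    · -- odd
      simp only [h]
      norm_num [hn]
      have := cong_result mod
        (SA.1 * 2) (Int.fmod (2 * SB.2.1 + 1 - 1) mod)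
        (Int.fmod (3^(N+1)) mod) (Int.fmod (6^(N+1)) mod) (Int.fmod (9^(N+1)) mod) (Int.fmod (10^(N+1)) mod)
        (Int.fmod (p0*3) mod) (Int.fmod (p1*9) mod) (Int.fmod (p2*30) mod) (Int.fmod (p3*36) mod)
        (Int.fmod (p4*60) mod) (Int.fmod (p5*81) mod) (Int.fmod (p6*90) mod)
        (N+1) true
        (fmod_sub_self_dvd _ _) (fmod_sub_self_dvd _ _) (fmod_sub_self_dvd _ _) (fmod_sub_self_dvd _ _)
        g0 g1 g2 g3 g4 g5 g6
        (by rw [h] at hmm; norm_num at hmm ⊢; exact hmm)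
      simp only [if_true] at this
      obtain ⟨w, hw⟩ := this
      norm_num at hw
      exact ⟨w, by linarith⟩

-- ===== VERDICT (by name: the statement is the Claim_ definition above) =====
theorem solve_spec : Claim_equal_solve := by
  intro cap mod _ _
  unfold Spec_solve solve solve_alt
  by_cases hc : cap < 1
  · have e : PySem.List.pyRange 1 (cap + 1) 1 = [] := by
      rw [PySem.List.pyRange_one]
      have h0 : (cap + 1 - 1).toNat = 0 := by omega
      rw [h0]; rfl
    rw [e]
    rfl
  · have hcap : cap = ((cap.toNat : Nat) : Int) := by omega
    rw [hcap]
    obtain ⟨p0, p1, p2, p3, p4, p5, p6, hpw, h0, h1, h2, h3, h4, h5, h6, hm, hr⟩ :=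
      loop_inv mod cap.toNat
    exact hr
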